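-- pv_equiv track=rewrite | github.com/narsue/BLJPS_Python | test.py | uncompress_bljps_path
-- ===== SOURCE A (Python) =====
-- def uncompress_bljps_path(path):
--     if not path:
--         return []
--     uncompressed_path = []
--     for p_id in range(len(path)-1):
--         current_p = [path[p_id][0],path[p_id][1]]
--         uncompressed_path.append(tuple(current_p))
--
--         while current_p[0] != path[p_id+1][0] or current_p[1] != path[p_id+1][1]:
--             if path[p_id+1][0] != current_p[0]:
--                 if path[p_id+1][0] > current_p[0]:
--                     current_p[0] += 1
--                 else:
--                     current_p[0] -= 1
--                 uncompressed_path.append(tuple(current_p))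
--             if path[p_id+1][1] != current_p[1]:
--                 if path[p_id+1][1] > current_p[1]:
--                     current_p[1] += 1
--                 else:
--                     current_p[1] -= 1
--                 uncompressed_path.append(tuple(current_p))
--     # print (path, uncompressed_path)
--     return uncompressed_path
-- ===== SOURCE B (Python) =====
-- def uncompress_bljps_path(path):
--     out = []
--     for (x0, y0), (x1, y1) in zip(path, path[1:]):
--         out.append((x0, y0))
--         adx = abs(x1 - x0)
--         ady = abs(y1 - y0)
--         sx = 1 if x1 > x0 else -1
--         sy = 1 if y1 > y0 else -1
--         for k in range(1, max(adx, ady) + 1):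
--             if k <= adx:
--                 out.append((x0 + k * sx, y0 + min(k - 1, ady) * sy))
--             if k <= ady:
--                 out.append((x0 + min(k, adx) * sx, y0 + k * sy))
--     return out
-- ===== Notes on version B (the rewrite author's own statement) =====
-- stated objective: alternative
-- what changed: Per waypoint segment, A walks a state-mutating while loop testing coordinate equality against the next waypoint; B instead precomputes the axis distances and signs and runs a counted for-loop over range(1, max(adx, ady)+1), emitting each intermediate cell by a closed-form expression in the loop index.
import Mathlib
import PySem

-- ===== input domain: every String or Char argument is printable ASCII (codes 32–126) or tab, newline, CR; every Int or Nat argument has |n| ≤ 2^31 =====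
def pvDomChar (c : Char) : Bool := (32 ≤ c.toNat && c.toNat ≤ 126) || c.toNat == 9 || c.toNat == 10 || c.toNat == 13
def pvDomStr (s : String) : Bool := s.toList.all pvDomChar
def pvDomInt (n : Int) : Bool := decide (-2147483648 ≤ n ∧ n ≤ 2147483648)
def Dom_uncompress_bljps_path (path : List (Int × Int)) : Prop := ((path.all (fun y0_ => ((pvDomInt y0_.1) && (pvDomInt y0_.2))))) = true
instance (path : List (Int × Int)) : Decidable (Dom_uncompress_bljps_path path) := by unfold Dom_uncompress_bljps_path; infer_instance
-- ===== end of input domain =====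

-- B replaces A's equality-tested while loop per segment by a counted for-loop over
-- range(1, max(adx, ady)+1) with closed-form step coordinates (objective: alternative).

-- ===== PORT A =====
-- the inner 'while current_p != path[p_id+1]' loop; acc is uncompressed_path.
-- fuel = |tx-x| + |ty-y| bounds the iteration count (each iteration decreases it),
-- so the structural recursion performs exactly the Python loop's iterations.
def pvWhileA : ℕ → Int → Int → Int → Int → List (Int × Int) → List (Int × Int)
  | 0, _, _, _, _, acc => acc
  | fuel + 1, tx, ty, x, y, acc =>
    if x ≠ tx ∨ y ≠ ty then
      let x' := if tx ≠ x then (if tx > x then x + 1 else x - 1) else x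
      let y' := if ty ≠ y then (if ty > y then y + 1 else y - 1) else y
      pvWhileA fuel tx ty x' y'
        (acc ++ ((if tx ≠ x then [(x', y)] else []) ++ (if ty ≠ y then [(x', y')] else [])))
    else acc

-- 'for p_id in range(len(path)-1)': walk the adjacent waypoint pairs
def pvOuterA : List (Int × Int) → List (Int × Int) → List (Int × Int)
  | a :: b :: rest, acc =>
    pvOuterA (b :: rest)
      (pvWhileA ((b.1 - a.1).natAbs + (b.2 - a.2).natAbs) b.1 b.2 a.1 a.2 (acc ++ [(a.1, a.2)]))
  | _, acc => acc

def uncompress_bljps_path (path : List (Int × Int)) : List (Int × Int) :=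
  match path with
  | [] => []
  | _ :: _ => pvOuterA path []

-- ===== PORT B =====
-- one segment of Source B: append start, then the counted for-loop with closed-form coordinates
def pvSegB (p q : Int × Int) (acc : List (Int × Int)) : List (Int × Int) :=
  let adx := |q.1 - p.1|
  let ady := |q.2 - p.2|
  let sx : Int := if q.1 > p.1 then 1 else -1
  let sy : Int := if q.2 > p.2 then 1 else -1
  (PySem.List.pyRange 1 (max adx ady + 1) 1).foldl
    (fun acc k =>
      let acc' := if k ≤ adx then acc ++ [(p.1 + k * sx, p.2 + min (k - 1) ady * sy)] else acc
      if k ≤ ady then acc' ++ [(p.1 + min k adx * sx, p.2 + k * sy)] else acc')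
    (acc ++ [(p.1, p.2)])

def uncompress_bljps_path_alt (path : List (Int × Int)) : List (Int × Int) :=
  (List.zip path path.tail).foldl (fun acc pq => pvSegB pq.1 pq.2 acc) []

-- ===== PRECONDITION & SPEC =====
def Spec_uncompress_bljps_path (path : List (Int × Int)) (out : List (Int × Int)) : Prop := out = uncompress_bljps_path_alt path
instance (path : List (Int × Int)) (out : List (Int × Int)) : Decidable (Spec_uncompress_bljps_path path out) := by unfold Spec_uncompress_bljps_path; infer_instance

-- ===== CLAIM (what is proved, stated in full; the proofs are below) =====
def Claim_equal_uncompress_bljps_path : Prop := ∀ (path : List (Int × Int)), Dom_uncompress_bljps_path path → Spec_uncompress_bljps_path path (uncompress_bljps_path path)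

-- ===== LEMMAS AND PROOFS =====
lemma whileA_append (f : ℕ) (tx ty x y : Int) (acc : List (Int × Int)) :
    pvWhileA f tx ty x y acc = acc ++ pvWhileA f tx ty x y [] := by
  induction f generalizing x y acc with
  | zero => simp [pvWhileA]
  | succ f IH =>
    by_cases h : x ≠ tx ∨ y ≠ ty
    · rw [pvWhileA, pvWhileA]
      simp only [if_pos h]
      conv_rhs => rw [IH]
      rw [IH]
      simp
    · rw [pvWhileA, pvWhileA]
      simp only [if_neg h]
      simp


def pvSg (t c : Int) : Int := if t > c then 1 else -1

def pvStep (t c : Int) : Int := if t ≠ c then (if t > c then c + 1 else c - 1) else c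

def pvPos (c t k : Int) : Int := c + min k |t - c| * pvSg t c

def pvG (x y tx ty k : Int) : List (Int × Int) :=
  (if k ≤ |tx - x| then [(x + k * pvSg tx x, y + min (k-1) |ty - y| * pvSg ty y)] else []) ++
  (if k ≤ |ty - y| then [(x + min k |tx - x| * pvSg tx x, y + k * pvSg ty y)] else [])

lemma pvPos_zero (c t : Int) : pvPos c t 0 = c := by
  unfold pvPos pvSg
  rw [min_eq_left (abs_nonneg _)]
  ring

lemma pvPos_one (c t : Int) : pvPos c t 1 = pvStep t c := by
  unfold pvPos pvStep pvSg
  simp only [Int.abs_eq_natAbs]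
  split_ifs <;> (try simp only [mul_one, mul_neg_one]) <;> omega

lemma pvPos_step (t c k : Int) (hk : 0 ≤ k) : pvPos c t (k+1) = pvPos (pvStep t c) t k := by
  unfold pvPos pvStep pvSg
  simp only [Int.abs_eq_natAbs]
  split_ifs <;> (try simp only [mul_one, mul_neg_one]) <;> omega

lemma pvCond_step (t c k : Int) (hk : 0 ≤ k) : (k+2 ≤ |t - c|) ↔ (k+1 ≤ |t - pvStep t c|) := by
  unfold pvStep
  simp only [Int.abs_eq_natAbs]
  split_ifs <;> omega

lemma pvCond_one (t c : Int) : (1 ≤ |t - c|) ↔ t ≠ c := by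
  simp only [Int.abs_eq_natAbs]
  omega

lemma pvG_eq_pos (x y tx ty k : Int) :
    pvG x y tx ty k =
      (if k ≤ |tx - x| then [(pvPos x tx k, pvPos y ty (k-1))] else []) ++
      (if k ≤ |ty - y| then [(pvPos x tx k, pvPos y ty k)] else []) := by
  unfold pvG pvPos
  by_cases h1 : k ≤ |tx - x| <;> by_cases h2 : k ≤ |ty - y| <;>
    simp [h1, h2]

lemma pvG_shift (tx ty x y k : Int) (hk : 0 ≤ k) :
    pvG x y tx ty (k+2) = pvG (pvStep tx x) (pvStep ty y) tx ty (k+1) := by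
  rw [pvG_eq_pos, pvG_eq_pos]
  have p1 : pvPos x tx (k+2) = pvPos (pvStep tx x) tx (k+1) := by
    have h := pvPos_step tx x (k+1) (by omega); rw [show k+1+1 = k+2 by ring] at h; exact h
  have p2 : pvPos y ty (k+1) = pvPos (pvStep ty y) ty k := pvPos_step ty y k hk
  have p3 : pvPos y ty (k+2) = pvPos (pvStep ty y) ty (k+1) := by
    have h := pvPos_step ty y (k+1) (by omega); rw [show k+1+1 = k+2 by ring] at h; exact h
  rw [show k+2-1 = k+1 by ring, show k+1-1 = k by ring, p1, p2, p3]
  simp only [pvCond_step tx x k hk, pvCond_step ty y k hk]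

lemma pvG_one (tx ty x y : Int) :
    pvG x y tx ty 1 =
      (if tx ≠ x then [(pvStep tx x, y)] else []) ++
      (if ty ≠ y then [(pvStep tx x, pvStep ty y)] else []) := by
  rw [pvG_eq_pos, pvPos_one, show (1:Int)-1 = 0 by ring, pvPos_zero, pvPos_one]
  simp only [pvCond_one]

lemma whileA_base (f : ℕ) (tx ty x y : Int) (hx : x = tx) (hy : y = ty) :
    pvWhileA f tx ty x y [] =
      (PySem.List.pyRange 1 (max |tx - x| |ty - y| + 1) 1).flatMap (pvG x y tx ty) := by
  subst hx; subst hy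
  have hnil : (PySem.List.pyRange 1 (max |x - x| |y - y| + 1) 1).flatMap (pvG x y x y) = [] := by
    rw [show max |x - x| |y - y| + 1 = 1 by simp, PySem.List.pyRange_one_eq_nil le_rfl]
    simp
  cases f with
  | zero => rw [hnil]; rfl
  | succ f =>
    rw [pvWhileA, if_neg (by simp), hnil]

lemma flatMap_shift (tx ty x y : Int) (h0 : x ≠ tx ∨ y ≠ ty) :
    (PySem.List.pyRange 2 (max |tx - x| |ty - y| + 1) 1).flatMap (pvG x y tx ty) =
      (PySem.List.pyRange 1 (max |tx - pvStep tx x| |ty - pvStep ty y| + 1) 1).flatMap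
        (pvG (pvStep tx x) (pvStep ty y) tx ty) := by
  have hM' : max |tx - pvStep tx x| |ty - pvStep ty y| = max |tx - x| |ty - y| - 1 := by
    unfold pvStep
    simp only [Int.abs_eq_natAbs]
    rcases h0 with h0 | h0 <;> split_ifs <;> omega
  rw [hM', show max |tx - x| |ty - y| - 1 + 1 = max |tx - x| |ty - y| by ring]
  rw [PySem.List.pyRange_one 2 (max |tx - x| |ty - y| + 1),
    PySem.List.pyRange_one 1 (max |tx - x| |ty - y|)]
  rw [show max |tx - x| |ty - y| + 1 - 2 = max |tx - x| |ty - y| - 1 by ring]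
  rw [List.flatMap_map, List.flatMap_map]
  apply List.flatMap_congr
  intro a _
  rw [show (2:Int) + (a:Int) = (a:Int) + 2 by ring, show (1:Int) + (a:Int) = (a:Int) + 1 by ring]
  exact pvG_shift tx ty x y (a : Int) (by positivity)

lemma whileA_eq (f : ℕ) (tx ty x y : Int) (h : (tx - x).natAbs + (ty - y).natAbs ≤ f) :
    pvWhileA f tx ty x y [] =
      (PySem.List.pyRange 1 (max |tx - x| |ty - y| + 1) 1).flatMap (pvG x y tx ty) := by
  induction f generalizing x y with
  | zero => exact whileA_base 0 tx ty x y (by omega) (by omega)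
  | succ n IH =>
    by_cases h0 : x ≠ tx ∨ y ≠ ty
    · have hM : 1 ≤ max |tx - x| |ty - y| := by
        simp only [Int.abs_eq_natAbs]
        rcases h0 with h0 | h0 <;> omega
      conv_rhs => rw [PySem.List.pyRange_one_cons (by omega : (1:Int) < max |tx - x| |ty - y| + 1)]
      rw [List.flatMap_cons, pvG_one, show (1:Int)+1 = 2 by norm_num, flatMap_shift tx ty x y h0]
      rw [pvWhileA]
      simp only [if_pos h0]
      rw [show (if tx ≠ x then (if tx > x then x + 1 else x - 1) else x) = pvStep tx x from rfl,
        show (if ty ≠ y then (if ty > y then y + 1 else y - 1) else y) = pvStep ty y from rfl,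
        whileA_append,
        IH (pvStep tx x) (pvStep ty y)
          (by unfold pvStep; rcases h0 with h0 | h0 <;> split_ifs <;> omega)]
      simp [List.append_assoc]
    · rw [not_or, not_not, not_not] at h0
      exact whileA_base (n+1) tx ty x y h0.1 h0.2

lemma segB_eq (p q : Int × Int) (acc : List (Int × Int)) :
    pvSegB p q acc =
      (acc ++ [(p.1, p.2)]) ++
        (PySem.List.pyRange 1 (max |q.1 - p.1| |q.2 - p.2| + 1) 1).flatMap (pvG p.1 p.2 q.1 q.2) := by
  rw [show pvSegB p q acc =
      List.foldl
        (fun acc k =>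
          let acc' := if k ≤ |q.1 - p.1| then
              acc ++ [(p.1 + k * (if q.1 > p.1 then 1 else -1),
                p.2 + min (k - 1) |q.2 - p.2| * (if q.2 > p.2 then 1 else -1))]
            else acc
          if k ≤ |q.2 - p.2| then
            acc' ++ [(p.1 + min k |q.1 - p.1| * (if q.1 > p.1 then 1 else -1),
              p.2 + k * (if q.2 > p.2 then 1 else -1))]
          else acc')
        (acc ++ [(p.1, p.2)])
        (PySem.List.pyRange 1 (max |q.1 - p.1| |q.2 - p.2| + 1) 1) from rfl]
  rw [PySem.List.foldl_congr_mem _ _ (fun acc k => acc ++ pvG p.1 p.2 q.1 q.2 k) _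
    (by intro acc k _; unfold pvG pvSg; split_ifs <;> simp_all)]
  rw [PySem.List.foldl_append_eq_flatMap]

lemma outerA_eq (path : List (Int × Int)) (acc : List (Int × Int)) :
    pvOuterA path acc = (List.zip path path.tail).foldl (fun acc pq => pvSegB pq.1 pq.2 acc) acc := by
  induction path generalizing acc with
  | nil => rfl
  | cons a t IH =>
    cases t with
    | nil => rfl
    | cons b r =>
      rw [pvOuterA, IH]
      have hseg : pvWhileA ((b.1 - a.1).natAbs + (b.2 - a.2).natAbs) b.1 b.2 a.1 a.2
          (acc ++ [(a.1, a.2)]) = pvSegB a b acc := by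
        rw [whileA_append, whileA_eq _ b.1 b.2 a.1 a.2 le_rfl, segB_eq]
      simp only [List.tail_cons, List.zip_cons_cons, List.foldl_cons, hseg]

-- ===== VERDICT (by name: the statement is the Claim_ definition above) =====
theorem uncompress_bljps_path_spec : Claim_equal_uncompress_bljps_path := by
  intro path _
  unfold Spec_uncompress_bljps_path uncompress_bljps_path uncompress_bljps_path_alt
  match path with
  | [] => rfl
  | a :: t => exact outerA_eq (a :: t) []
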